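-- pv_equiv track=rewrite | github.com/Alpha-Leporis/code | questions/HR/getMinTime.py | minDNSResolutionTime
-- ===== SOURCE A (Python) =====
-- from collections import OrderedDict, deque
--
-- def minDNSResolutionTime(urls, cache_size, cache_time, server_time):
--     cache = OrderedDict()  # Initialize an empty cache (OrderedDict)
--     total_time = 0  # Initialize total time counter
--
--     for url in urls:
--         if url in cache:
--             # If URL is in the cache, fetch IP address from cache
--             total_time += cache_time
--             # Move the URL to the end of the OrderedDict to maintain its freshness
--             cache.move_to_end(url)
--         else:
--             # If URL is not in the cache, fetch IP address from DNS server
--             total_time += server_time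
--
--             # Update cache with URL-IP mapping
--             cache[url] = True
--
--             # If cache size exceeds the maximum limit, remove the oldest entry
--             if len(cache) > cache_size:
--                 # Remove the oldest entry from the cache
--                 oldest_url = cache.popitem(last=False)[0]
--
--     return total_time
-- ===== SOURCE B (Python) =====
-- def minDNSResolutionTime(urls, cache_size, cache_time, server_time):
--     # Plain dict url -> last-access clock instead of an OrderedDict; eviction
--     # scans for the minimum timestamp (the least-recently-used url).
--     stamp = {}
--     total = 0
--     for clock, url in enumerate(urls):
--         if url in stamp:
--             total += cache_time
--             stamp[url] = clock
--         else:
--             total += server_time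
--             stamp[url] = clock
--             if len(stamp) > cache_size:
--                 victim = min(stamp, key=stamp.get)
--                 del stamp[victim]
--     return total
-- ===== Notes on version B (the rewrite author's own statement) =====
-- stated objective: alternative
-- what changed: Replaces the OrderedDict LRU recency queue (move_to_end / popitem) by a plain dict mapping each url to its last-access clock, evicting the key with the minimum timestamp by a scan.
import Mathlib
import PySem

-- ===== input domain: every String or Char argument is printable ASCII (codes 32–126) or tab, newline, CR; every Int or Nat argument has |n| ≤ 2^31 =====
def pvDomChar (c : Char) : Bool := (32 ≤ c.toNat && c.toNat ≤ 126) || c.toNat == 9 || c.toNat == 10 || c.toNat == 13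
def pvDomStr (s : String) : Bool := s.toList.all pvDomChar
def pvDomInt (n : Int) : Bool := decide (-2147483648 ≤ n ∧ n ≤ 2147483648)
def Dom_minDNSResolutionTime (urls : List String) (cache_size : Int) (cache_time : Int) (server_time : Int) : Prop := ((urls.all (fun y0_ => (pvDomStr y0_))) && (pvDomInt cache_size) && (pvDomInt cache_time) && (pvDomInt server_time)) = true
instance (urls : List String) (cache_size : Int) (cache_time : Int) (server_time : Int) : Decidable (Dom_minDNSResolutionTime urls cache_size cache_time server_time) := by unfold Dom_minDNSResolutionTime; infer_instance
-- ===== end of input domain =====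

-- B replaces the OrderedDict LRU queue by a plain url -> last-access-clock dict with a
-- min-timestamp scan for eviction (alternative data structure; not claimed faster).

-- ===== PORT A =====
-- A's OrderedDict maps every key to True, so it is ported as its key list in order
-- (oldest first): `url in cache` = list membership, `move_to_end` = erase + append,
-- `cache[url] = True` on a fresh key = append, `popitem(last=False)` = drop the head.
def pvStepA (cache_size cache_time server_time : Int) (acc : List String × Int) (url : String) : List String × Int :=
  if url ∈ acc.1 then
    (acc.1.erase url ++ [url], acc.2 + cache_time)
  else
    let cache := acc.1 ++ [url]
    if (cache.length : Int) > cache_size then (cache.tail, acc.2 + server_time)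
    else (cache, acc.2 + server_time)

def minDNSResolutionTime (urls : List String) (cache_size : Int) (cache_time : Int) (server_time : Int) : Int :=
  (urls.foldl (pvStepA cache_size cache_time server_time) ([], 0)).2

-- ===== PORT B =====
-- `min(stamp, key=stamp.get)` = first item of minimal value, in insertion order;
-- the `none` branch is unreachable (the dict is nonempty right after the insert).
def pvStepB (cache_size cache_time server_time : Int) (acc : PySem.Dict String Int × Int) (p : Int × String) : PySem.Dict String Int × Int :=
  if acc.1.contains p.2 then
    (acc.1.insert p.2 p.1, acc.2 + cache_time)
  else
    let d := acc.1.insert p.2 p.1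
    if (d.size : Int) > cache_size then
      match PySem.List.min? d.items (fun q => q.2) with
      | some victim => (d.erase victim.1, acc.2 + server_time)
      | none => (d, acc.2 + server_time)
    else (d, acc.2 + server_time)

def minDNSResolutionTime_alt (urls : List String) (cache_size : Int) (cache_time : Int) (server_time : Int) : Int :=
  ((PySem.List.enumerate urls).foldl (pvStepB cache_size cache_time server_time) (PySem.Dict.empty, 0)).2

-- ===== PRECONDITION & SPEC =====
def Spec_minDNSResolutionTime (urls : List String) (cache_size : Int) (cache_time : Int) (server_time : Int) (out : Int) : Prop := out = minDNSResolutionTime_alt urls cache_size cache_time server_time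
instance (urls : List String) (cache_size : Int) (cache_time : Int) (server_time : Int) (out : Int) : Decidable (Spec_minDNSResolutionTime urls cache_size cache_time server_time out) := by unfold Spec_minDNSResolutionTime; infer_instance

-- ===== CLAIM (what is proved, stated in full; the proofs are below) =====
def Claim_equal_minDNSResolutionTime : Prop := ∀ (urls : List String) (cache_size : Int) (cache_time : Int) (server_time : Int), Dom_minDNSResolutionTime urls cache_size cache_time server_time → Spec_minDNSResolutionTime urls cache_size cache_time server_time (minDNSResolutionTime urls cache_size cache_time server_time)

-- ===== LEMMAS AND PROOFS =====

-- Coupling invariant between A's LRU list (oldest first) and B's timestamp dict: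
-- same members, timestamps strictly increase along the list and are all below the clock.
def pvInv (cache : List String) (d : PySem.Dict String Int) (clock : Int) : Prop :=
  d.keys.Nodup ∧
  (∀ u, u ∈ cache ↔ d.contains u = true) ∧
  cache.Pairwise (fun a b => d.getD a 0 < d.getD b 0) ∧
  (∀ u ∈ cache, d.getD u 0 < clock)

theorem pvInv_nodup {c : List String} {d : PySem.Dict String Int} {k : Int} (h : pvInv c d k) : c.Nodup := by
  refine h.2.2.1.imp ?_
  intro a b hab
  rintro rfl
  exact lt_irrefl _ hab

theorem pvInv_length {c : List String} {d : PySem.Dict String Int} {k : Int} (h : pvInv c d k) : d.keys.length = c.length := by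
  have hp : c.Perm d.keys := by
    refine (List.perm_ext_iff_of_nodup (pvInv_nodup h) h.1).mpr ?_
    intro u
    rw [h.2.1 u, PySem.Dict.contains_iff_mem_keys]
  exact (hp.length_eq).symm

theorem pv_contains_erase_self (d : PySem.Dict String Int) (x : String) :
    (d.erase x).contains x = false := by
  simp only [PySem.Dict.erase, PySem.Dict.contains, List.any_filter]
  simp

theorem pv_get?_erase_of_ne (d : PySem.Dict String Int) {x u : String} (h : u ≠ x) :
    (d.erase x).get? u = d.get? u := by
  simp only [PySem.Dict.erase, PySem.Dict.get?]
  congr 1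
  induction d.items with
  | nil => rfl
  | cons p rest ih =>
    rw [List.filter_cons]
    by_cases hp : p.1 = x
    · have : (x == u) = false := by simp [Ne.symm h]
      simp [hp, List.find?, this, ih]
    · by_cases hu : p.1 = u
      · have hux : (u = x) = False := by simp [h]
        simp [hu, hux, List.find?]
      · have hpu : (p.1 == u) = false := by simp [hu]
        simp [hp, hpu, List.find?, ih]

theorem pv_nodup_keys_erase (d : PySem.Dict String Int) (x : String) (h : d.keys.Nodup) :
    (d.erase x).keys.Nodup := by
  have : (d.erase x).keys.Sublist d.keys := by
    simpa [PySem.Dict.erase, PySem.Dict.keys] using List.Sublist.map Prod.fst (List.filter_sublist (l := d.items))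
  exact h.sublist this

theorem pv_getD_erase_of_ne (d : PySem.Dict String Int) {x u : String} (h : u ≠ x) :
    (d.erase x).getD u 0 = d.getD u 0 := by
  rw [PySem.Dict.getD_eq_get?_getD, PySem.Dict.getD_eq_get?_getD, pv_get?_erase_of_ne d h]

theorem pv_contains_erase_of_ne (d : PySem.Dict String Int) {x u : String} (h : u ≠ x) :
    (d.erase x).contains u = d.contains u := by
  rw [PySem.Dict.contains_eq_isSome_get?, PySem.Dict.contains_eq_isSome_get?, pv_get?_erase_of_ne d h]

theorem pvInv_access {c : List String} {d : PySem.Dict String Int} {k : Int} (h : pvInv c d k) (url : String) :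
    pvInv (c.erase url ++ [url]) (d.insert url k) (k + 1) := by
  obtain ⟨hnd, hmem, hpw, hbd⟩ := h
  have hcn : c.Nodup := pvInv_nodup ⟨hnd, hmem, hpw, hbd⟩
  have hce : ∀ u, u ∈ c.erase url ↔ u ≠ url ∧ u ∈ c := fun u => hcn.mem_erase_iff
  refine ⟨PySem.Dict.nodup_keys_insert d url k hnd, ?_, ?_, ?_⟩
  · intro u
    rw [List.mem_append, List.mem_singleton, PySem.Dict.contains_insert, hce u]
    by_cases hu : u = url <;> simp [hu, hmem u]
  · rw [List.pairwise_append]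
    refine ⟨?_, by simp, ?_⟩
    · refine ((hpw.sublist (List.erase_sublist)).imp_of_mem ?_)
      intro a b ha hb hab
      rw [PySem.Dict.getD_insert, PySem.Dict.getD_insert,
        if_neg ((hce a).mp ha).1, if_neg ((hce b).mp hb).1]
      exact hab
    · intro a ha b hb
      rw [List.mem_singleton] at hb
      subst hb
      rw [PySem.Dict.getD_insert, PySem.Dict.getD_insert, if_pos rfl, if_neg ((hce a).mp ha).1]
      exact hbd a ((hce a).mp ha).2
  · intro u hu
    rw [List.mem_append, List.mem_singleton] at hu
    rw [PySem.Dict.getD_insert]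
    by_cases h1 : u = url
    · rw [if_pos h1]; omega
    · rw [if_neg h1]
      have := hbd u ((hce u).mp (hu.resolve_right h1)).2
      omega

theorem pvInv_evict {c0 : String} {rest : List String} {d : PySem.Dict String Int} {k : Int}
    (h : pvInv (c0 :: rest) d k) :
    PySem.List.min? d.items (fun q => q.2) = some (c0, d.getD c0 0) ∧ pvInv rest (d.erase c0) k := by
  obtain ⟨hnd, hmem, hpw, hbd⟩ := h
  have hcn : (c0 :: rest).Nodup := pvInv_nodup ⟨hnd, hmem, hpw, hbd⟩
  have hc0 : d.contains c0 = true := (hmem c0).mp (List.mem_cons_self)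
  obtain ⟨v, hv⟩ : ∃ v, d.get? c0 = some v := by
    rw [PySem.Dict.contains_eq_isSome_get?] at hc0
    exact Option.isSome_iff_exists.mp hc0
  have hgd : d.getD c0 0 = v := by rw [PySem.Dict.getD_eq_get?_getD, hv]; rfl
  have hvmem : (c0, v) ∈ d.items := PySem.Dict.mem_items_of_get?_eq_some d hv
  have hlt : ∀ u ∈ rest, d.getD c0 0 < d.getD u 0 := by
    intro u hu
    exact (List.pairwise_cons.mp hpw).1 u hu
  have hmin : PySem.List.min? d.items (fun q => q.2) = some (c0, d.getD c0 0) := by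
    cases hm : PySem.List.min? d.items (fun q => q.2) with
    | none =>
      rw [PySem.List.min?_eq_none_iff] at hm
      rw [hm] at hvmem
      exact absurd hvmem (List.not_mem_nil)
    | some p =>
      have hpmem : p ∈ d.items := PySem.List.min?_mem hm
      have hple : p.2 ≤ v := PySem.List.min?_isMin hm (c0, v) hvmem
      have hpk : p.1 ∈ c0 :: rest := (hmem p.1).mpr (by
        rw [PySem.Dict.contains_iff_mem_keys]
        exact PySem.Dict.mem_keys_of_mem_items d hpmem)
      have hpv : d.getD p.1 0 = p.2 := PySem.Dict.getD_of_mem_items d (by simpa using hpmem) hnd 0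
      have hp1 : p.1 = c0 := by
        rcases List.mem_cons.mp hpk with h1 | h1
        · exact h1
        · exfalso
          have := hlt p.1 h1
          rw [hpv, hgd] at this
          omega
      have hp2 : p.2 = v := by
        have := PySem.Dict.get?_of_mem_items d (k := c0) (v := p.2) (by rw [← hp1]; simpa using hpmem) hnd
        rw [hv] at this
        exact (Option.some_inj.mp this).symm
      rw [hgd]
      congr 1
      exact Prod.ext hp1 hp2
  refine ⟨hmin, ?_, ?_, ?_, ?_⟩
  · exact pv_nodup_keys_erase d c0 hnd
  · intro u
    constructor
    · intro hu
      have hne : u ≠ c0 := by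
        rintro rfl
        exact (List.nodup_cons.mp hcn).1 hu
      rw [pv_contains_erase_of_ne d hne]
      exact (hmem u).mp (List.mem_cons_of_mem _ hu)
    · intro hu
      by_cases hne : u = c0
      · rw [hne, pv_contains_erase_self] at hu; cases hu
      · rw [pv_contains_erase_of_ne d hne] at hu
        rcases List.mem_cons.mp ((hmem u).mpr hu) with h1 | h1
        · exact absurd h1 hne
        · exact h1
  · refine ((List.pairwise_cons.mp hpw).2).imp_of_mem ?_
    intro a b ha hb hab
    have hna : a ≠ c0 := by rintro rfl; exact (List.nodup_cons.mp hcn).1 ha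
    have hnb : b ≠ c0 := by rintro rfl; exact (List.nodup_cons.mp hcn).1 hb
    rw [pv_getD_erase_of_ne d hna, pv_getD_erase_of_ne d hnb]
    exact hab
  · intro u hu
    have hne : u ≠ c0 := by rintro rfl; exact (List.nodup_cons.mp hcn).1 hu
    rw [pv_getD_erase_of_ne d hne]
    exact hbd u (List.mem_cons_of_mem _ hu)

theorem pv_main (cs ct st : Int) : ∀ (urls : List String) (c : List String) (d : PySem.Dict String Int) (k t : Int),
    pvInv c d k →
    (urls.foldl (pvStepA cs ct st) (c, t)).2
      = ((PySem.List.enumerate urls k).foldl (pvStepB cs ct st) (d, t)).2 := by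
  intro urls
  induction urls with
  | nil => intro c d k t h; rfl
  | cons url rest ih =>
    intro c d k t h
    rw [PySem.List.enumerate_cons, List.foldl_cons, List.foldl_cons]
    have hacc := pvInv_access h url
    by_cases hm : url ∈ c
    · have hct : d.contains url = true := (h.2.1 url).mp hm
      rw [show pvStepA cs ct st (c, t) url = (c.erase url ++ [url], t + ct) by
            simp [pvStepA, hm],
          show pvStepB cs ct st (d, t) (k, url) = (d.insert url k, t + ct) by
            simp [pvStepB, hct]]
      exact ih _ _ _ _ hacc
    · have hct : d.contains url = false := by
        rcases Bool.eq_false_or_eq_true (d.contains url) with h1 | h1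
        · exact absurd ((h.2.1 url).mpr h1) hm
        · exact h1
      have hceq : c.erase url ++ [url] = c ++ [url] := by rw [List.erase_of_not_mem hm]
      rw [hceq] at hacc
      have hsz : ((d.insert url k).size : Int) = ((c ++ [url]).length : Int) := by
        rw [PySem.Dict.size_insert, if_neg (by simp [hct])]
        have : d.size = d.keys.length := by
          simp [PySem.Dict.size, PySem.Dict.keys]
        rw [this, pvInv_length h]
        simp
      by_cases hbig : ((c ++ [url]).length : Int) > cs
      · obtain ⟨c0, rest', hce⟩ : ∃ a l, c ++ [url] = a :: l := by
          cases c with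
          | nil => exact ⟨url, [], rfl⟩
          | cons a l => exact ⟨a, l ++ [url], rfl⟩
        rw [hce] at hacc
        obtain ⟨hmin, hinv'⟩ := pvInv_evict hacc
        rw [show pvStepA cs ct st (c, t) url = ((c0 :: rest').tail, t + st) by
              simp only [pvStepA, if_neg hm, hce]
              rw [if_pos (by rw [← hce]; exact hbig)],
            show pvStepB cs ct st (d, t) (k, url) = ((d.insert url k).erase c0, t + st) by
              simp only [pvStepB, hct, Bool.false_eq_true, if_false]
              rw [if_pos (by rw [hsz]; exact hbig), hmin]]
        exact ih _ _ _ _ hinv'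
      · rw [show pvStepA cs ct st (c, t) url = (c ++ [url], t + st) by
              simp only [pvStepA, if_neg hm]
              rw [if_neg hbig],
            show pvStepB cs ct st (d, t) (k, url) = (d.insert url k, t + st) by
              simp only [pvStepB, hct, Bool.false_eq_true, if_false]
              rw [if_neg (by rw [hsz]; exact hbig)]]
        exact ih _ _ _ _ hacc

-- ===== VERDICT (by name: the statement is the Claim_ definition above) =====
theorem minDNSResolutionTime_spec : Claim_equal_minDNSResolutionTime := by
  intro urls cs ct st _
  unfold Spec_minDNSResolutionTime minDNSResolutionTime minDNSResolutionTime_alt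
  exact pv_main cs ct st urls [] PySem.Dict.empty 0 0
    ⟨by simp [PySem.Dict.keys_empty], by simp [PySem.Dict.contains_empty], by simp, by simp⟩
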